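-- pv_equiv track=rewrite | github.com/krebsni/rcv-jubilee-to-obsidian-converter | bible_processor/utils.py | adjust_newlines
-- ===== SOURCE A (Python) =====
-- def adjust_newlines(text: str) -> str:
--     """Adjust newlines for chapter headings and spacing."""
--     lines = text.splitlines()
--     new_lines = []
--     i = 0
--     while i < len(lines):
--         line = lines[i]
--         if "|Chapter" in line:
--             if new_lines and new_lines[-1].strip() != "":
--                 new_lines.append("")
--             if i + 1 < len(lines):
--                 line = line + " " + lines[i + 1].lstrip()
--                 i += 1
--         new_lines.append(line)
--         i += 1
--     return "\n".join(new_lines)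
-- ===== SOURCE B (Python) =====
-- def adjust_newlines(text: str) -> str:
--     """Adjust newlines for chapter headings and spacing (two-pass version)."""
--     lines = text.splitlines()
--     # pass 1: merge each chapter line with the (lstripped) line after it
--     merged = []
--     it = iter(lines)
--     for line in it:
--         if "|Chapter" in line:
--             nxt = next(it, None)
--             merged.append(line if nxt is None else line + " " + nxt.lstrip())
--         else:
--             merged.append(line)
--     # pass 2: insert a blank line before each chapter line when needed
--     out = []
--     for line in merged:
--         if "|Chapter" in line and out and out[-1].strip():
--             out.append("")
--         out.append(line)
--     return "\n".join(out)
-- ===== Notes on version B (the rewrite author's own statement) =====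
-- stated objective: alternative
-- what changed: Replaced A's single index-driven while loop (manual i skipping and mid-branch look-behind) by two passes: an iterator pass that merges each chapter line with its lstripped successor, then a fold that inserts blank lines before chapter lines.
import Mathlib
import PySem

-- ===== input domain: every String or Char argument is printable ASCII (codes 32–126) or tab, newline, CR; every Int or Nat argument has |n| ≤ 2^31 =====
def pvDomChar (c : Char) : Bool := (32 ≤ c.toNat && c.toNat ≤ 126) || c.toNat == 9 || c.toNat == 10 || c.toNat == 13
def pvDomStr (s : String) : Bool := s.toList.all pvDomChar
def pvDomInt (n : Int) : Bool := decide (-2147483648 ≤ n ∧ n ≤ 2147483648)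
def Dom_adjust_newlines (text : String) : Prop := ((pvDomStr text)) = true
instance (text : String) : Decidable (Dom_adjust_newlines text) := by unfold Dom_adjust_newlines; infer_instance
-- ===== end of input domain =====

-- B replaces A's fused index-skipping while loop by a merge pass followed by a blank-insertion fold (alternative decomposition, same cost).

-- '"|Chapter" in line' (shared trivial helper)
def pvChap (l : List Char) : Bool := PySem.Chars.isIn "|Chapter".toList l

-- ===== PORT A =====
-- A's while loop over index i, as structural recursion on the remaining lines
-- (i += 2 in the merge branch = dropping two list elements).
def loopA : List (List Char) → List (List Char) → List (List Char)
  | acc, [] => acc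
  | acc, line :: rest =>
    if pvChap line then
      let acc2 := match acc.getLast? with
        | some last => if PySem.Chars.strip last ≠ [] then acc ++ [[]] else acc
        | none => acc
      match rest with
      | next :: rest' => loopA (acc2 ++ [line ++ ' ' :: PySem.Chars.lstrip next]) rest'
      | [] => loopA (acc2 ++ [line]) []
    else loopA (acc ++ [line]) rest

def adjust_newlines (text : String) : String :=
  String.ofList (PySem.Chars.join "\n".toList (loopA [] (PySem.Chars.splitlines text.toList)))

-- ===== PORT B =====
-- pass 1: merge each chapter line with its lstripped successor
def mergeB : List (List Char) → List (List Char)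
  | [] => []
  | l :: rest =>
    if pvChap l then
      match rest with
      | n :: rest' => (l ++ ' ' :: PySem.Chars.lstrip n) :: mergeB rest'
      | [] => [l]
    else l :: mergeB rest

-- pass 2, one fold step: blank line before a chapter line when the output ends non-blank
def spaceStep (acc : List (List Char)) (l : List Char) : List (List Char) :=
  if pvChap l && (match acc.getLast? with
      | some last => !(PySem.Chars.strip last).isEmpty
      | none => false) then
    acc ++ [[], l]
  else acc ++ [l]

def adjust_newlines_alt (text : String) : String :=
  String.ofList (PySem.Chars.join "\n".toList
    (((PySem.Chars.splitlines text.toList |> mergeB).foldl spaceStep [])))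

-- ===== PRECONDITION & SPEC =====
def Spec_adjust_newlines (text : String) (out : String) : Prop := out = adjust_newlines_alt text
instance (text : String) (out : String) : Decidable (Spec_adjust_newlines text out) := by unfold Spec_adjust_newlines; infer_instance

-- ===== CLAIM (what is proved, stated in full; the proofs are below) =====
def Claim_equal_adjust_newlines : Prop := ∀ (text : String), Dom_adjust_newlines text → Spec_adjust_newlines text (adjust_newlines text)

-- ===== LEMMAS AND PROOFS =====

theorem pvChap_append (l x : List Char) (h : pvChap l = true) : pvChap (l ++ x) = true := by
  unfold pvChap at *
  rw [PySem.Chars.isIn_iff_infix] at *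
  exact h.trans (l.prefix_append x).isInfix

theorem spaceStep_of_chap (l : List Char) (hc : pvChap l = true) (acc' : List (List Char)) :
    spaceStep acc' l =
      (match acc'.getLast? with
        | some last => if PySem.Chars.strip last ≠ [] then acc' ++ [[]] else acc'
        | none => acc') ++ [l] := by
  unfold spaceStep
  rcases h : acc'.getLast? with _ | last
  · simp [hc, h]
  · by_cases hs : PySem.Chars.strip last = []
    · simp [hc, h, hs]
    · simp [hc, h, hs, List.isEmpty_iff]

theorem loopA_eq_fold : ∀ (lines acc : List (List Char)),
    loopA acc lines = (mergeB lines).foldl spaceStep acc := by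
  intro lines
  induction lines using mergeB.induct with
  | case1 => intro acc; simp [loopA, mergeB]
  | case2 l hc n rest' ih =>
      intro acc
      rw [loopA, mergeB]
      simp only [hc, if_true]
      rw [List.foldl_cons, ih]
      congr 1
      rw [spaceStep_of_chap _ (pvChap_append _ _ hc)]
  | case3 l hc =>
      intro acc
      rw [loopA, mergeB]
      simp only [hc, if_true]
      rw [loopA, List.foldl_cons, List.foldl_nil]
      rw [spaceStep_of_chap _ hc]
  | case4 l rest hc ih =>
      intro acc
      rw [loopA, mergeB.eq_def]
      simp only [hc, Bool.false_eq_true, if_false]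
      rw [List.foldl_cons, ih]
      congr 1
      unfold spaceStep
      simp [hc]

-- ===== VERDICT (by name: the statement is the Claim_ definition above) =====
theorem adjust_newlines_spec : Claim_equal_adjust_newlines := by
  intro text _
  unfold Spec_adjust_newlines adjust_newlines adjust_newlines_alt
  rw [loopA_eq_fold]
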